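-- pv_equiv track=rewrite | github.com/KrijnS8/CalculatorBot | calculate.py | group_parts
-- ===== SOURCE A (Python) =====
-- from typing import List
--
-- def group_parts(content) -> List[str]:
--     """
--     Groups equation into appropriate parts
--     :param content: equation to check (string)
--     :return: list with all parts (array)
--     """
--     parts = ['']
--     numbers = set('1234567890')
--     selection = 0
--
--     for i in range(len(content) - 1):
--         if set(content[i]) <= numbers and set(content[i + 1]) <= numbers:
--             parts[selection] += content[i]
--             continue
--
--         parts[selection] += content[i]
--         selection += 1
--         parts.append('')
--     parts[selection] += content[len(content) - 1]
--
--     return parts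
-- ===== SOURCE B (Python) =====
-- def group_parts(content):
--     """
--     Groups equation into appropriate parts
--     :param content: equation to check (string)
--     :return: list with all parts (array)
--     """
--     digits = '1234567890'
--     tokens = []
--     for ch in content:
--         if tokens and ch in digits and tokens[-1][-1] in digits:
--             tokens[-1] += ch
--         else:
--             tokens.append(ch)
--     return tokens
-- ===== Notes on version B (the rewrite author's own statement) =====
-- stated objective: idiomatic
-- what changed: Replaces A's index loop over range(len-1) with content[i]/content[i+1] lookahead and an explicit parts/selection counter by a single extend-or-append pass over the characters that decides from the last character of the last token.
import Mathlib
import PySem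

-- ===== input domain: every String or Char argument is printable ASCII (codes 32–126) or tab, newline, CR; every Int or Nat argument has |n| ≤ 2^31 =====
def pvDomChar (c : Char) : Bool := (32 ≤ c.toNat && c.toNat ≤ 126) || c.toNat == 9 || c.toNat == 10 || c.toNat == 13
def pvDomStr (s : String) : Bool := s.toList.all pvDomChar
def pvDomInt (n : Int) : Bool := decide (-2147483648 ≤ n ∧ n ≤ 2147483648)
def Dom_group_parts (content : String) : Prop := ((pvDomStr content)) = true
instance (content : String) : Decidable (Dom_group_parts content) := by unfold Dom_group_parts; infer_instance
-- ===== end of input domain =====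

-- B replaces A's index-pair loop (range(len-1) with content[i]/content[i+1] and an explicit
-- selection counter) by a single extend-or-append pass over the characters themselves,
-- deciding from the last character of the last token; B returns [] on "" where A raises.

-- ===== PORT A =====
-- Strings are handled as their character lists (PySem style); parts[selection] += c is an
-- in-place update of slot `selection` (exact: selection is always a valid index in A's loop).
def group_parts (content : String) : List String :=
  let cs := content.toList
  let numbers : PySem.Set Char := PySem.Set.ofList "1234567890".toList
  let st := (PySem.List.pyRange 0 ((cs.length : Int) - 1) 1).foldl
    (fun (st : List (List Char) × Nat) i =>
      if PySem.Set.issubset (PySem.Set.ofList [PySem.List.pyGetD cs i ' ']) numbers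
          && PySem.Set.issubset (PySem.Set.ofList [PySem.List.pyGetD cs (i + 1) ' ']) numbers then
        (st.1.set st.2 (st.1.getD st.2 [] ++ [PySem.List.pyGetD cs i ' ']), st.2)
      else
        (st.1.set st.2 (st.1.getD st.2 [] ++ [PySem.List.pyGetD cs i ' ']) ++ [[]], st.2 + 1))
    ([[]], 0)
  match PySem.List.pyGet? cs ((cs.length : Int) - 1) with
  | none => []   -- content[len(content)-1] raises IndexError on "" (excluded by Pre_)
  | some c => (st.1.set st.2 (st.1.getD st.2 [] ++ [c])).map String.mk

-- ===== PORT B =====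
def group_parts_alt (content : String) : List String :=
  let digits := "1234567890".toList
  (content.toList.foldl
    (fun (tokens : List (List Char)) ch =>
      match tokens.getLast? with
      | none => [[ch]]                                   -- `tokens` falsy: start the first token
      | some t =>
        if digits.contains ch && digits.contains (t.getLast?.getD ' ') then
          tokens.dropLast ++ [t ++ [ch]]                 -- tokens[-1] += ch
        else
          tokens ++ [[ch]])                              -- tokens.append(ch)
    []).map String.mk

-- ===== PRECONDITION & SPEC =====
-- Pre_ excludes only the empty string, on which A raises IndexError at content[len(content)-1].
def Pre_group_parts (content : String) : Prop := content ≠ ""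
instance (content : String) : Decidable (Pre_group_parts content) := by unfold Pre_group_parts; infer_instance
def pvWitness_group_parts : String := "12+34"

def Spec_group_parts (content : String) (out : List String) : Prop := out = group_parts_alt content
instance (content : String) (out : List String) : Decidable (Spec_group_parts content out) := by unfold Spec_group_parts; infer_instance

-- ===== CLAIM (what is proved, stated in full; the proofs are below) =====
def Claim_equal_group_parts : Prop := ∀ (content : String), Dom_group_parts content → Pre_group_parts content → Spec_group_parts content (group_parts content)

-- ===== LEMMAS AND PROOFS =====

-- the digit test both programs perform, as a plain Bool
def isD (c : Char) : Bool := "1234567890".toList.contains c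

-- reference grouping both ports are reduced to
def grp : List Char → List (List Char)
  | [] => []
  | [c] => [[c]]
  | c :: d :: rest =>
    if isD c && isD d then
      match grp (d :: rest) with
      | [] => [[c]]
      | t :: ts => (c :: t) :: ts
    else [c] :: grp (d :: rest)

-- prepend a partial token onto the head group
def pre : List Char → List (List Char) → List (List Char)
  | _, [] => []
  | cur, t :: ts => (cur ++ t) :: ts

lemma pre_nil (l : List (List Char)) (h : l ≠ []) : pre [] l = l := by
  cases l with
  | nil => exact absurd rfl h
  | cons t ts => simp [pre]

lemma grp_ne_nil (s : List Char) (h : s ≠ []) : grp s ≠ [] := by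
  match s with
  | [c] => simp [grp]
  | c :: d :: rest =>
    rw [grp]
    split
    · rcases hg : grp (d :: rest) with _ | ⟨t, ts⟩ <;> simp
    · simp

lemma cond_eq (c : Char) :
    PySem.Set.issubset (PySem.Set.ofList [c]) (PySem.Set.ofList "1234567890".toList) = isD c := by
  rw [Bool.eq_iff_iff, PySem.Set.issubset_iff]
  constructor
  · intro hs
    have := hs c (by rw [show PySem.Set.ofList [c] = [c] from rfl]; simp)
    rw [PySem.Set.mem_ofList] at this
    simp [isD] at this ⊢
    exact this
  · intro hc x hx
    rw [show PySem.Set.ofList [c] = [c] from rfl] at hx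
    simp at hx; subst hx
    rw [PySem.Set.mem_ofList]; simpa [isD] using hc

-- A's step, with the condition already rewritten to isD
def stepA (st : List (List Char) × Nat) (c d : Char) : List (List Char) × Nat :=
  if isD c && isD d then
    (st.1.set st.2 (st.1.getD st.2 [] ++ [c]), st.2)
  else
    (st.1.set st.2 (st.1.getD st.2 [] ++ [c]) ++ [[]], st.2 + 1)

-- B's step
def stepB (tokens : List (List Char)) (ch : Char) : List (List Char) :=
  match tokens.getLast? with
  | none => [[ch]]
  | some t =>
    if isD ch && isD (t.getLast?.getD ' ') then tokens.dropLast ++ [t ++ [ch]]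
    else tokens ++ [[ch]]

-- A's index loop over range(len-1) is the fold of stepA over adjacent pairs
lemma fold_range_pairs (cs : List Char) :
    ∀ (init : List (List Char) × Nat),
      (List.range (cs.length - 1)).foldl
        (fun st k => stepA st (cs.getD k ' ') (cs.getD (k + 1) ' ')) init
      = (cs.zip cs.tail).foldl (fun st p => stepA st p.1 p.2) init := by
  induction cs with
  | nil => intro init; simp
  | cons c rest ih =>
    intro init
    match rest with
    | [] => simp
    | d :: rest' =>
      have hlen : (c :: d :: rest').length - 1 = (d :: rest').length - 1 + 1 := by
        simp
      rw [hlen, List.range_succ_eq_map, List.foldl_cons, List.foldl_map]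
      simpa using ih (stepA init c d)

lemma pyfold_eq_pairs (cs : List Char) (init : List (List Char) × Nat) :
    (PySem.List.pyRange 0 ((cs.length : Int) - 1) 1).foldl
      (fun st i => stepA st (PySem.List.pyGetD cs i ' ') (PySem.List.pyGetD cs (i + 1) ' ')) init
    = (cs.zip cs.tail).foldl (fun st p => stepA st p.1 p.2) init := by
  rw [PySem.List.pyRange_one, List.foldl_map, ← fold_range_pairs]
  have hn : ((cs.length : Int) - 1 - 0).toNat = cs.length - 1 := by omega
  rw [hn]
  apply PySem.List.foldl_congr_mem
  intro acc k _
  have h1 : ((0 : Int) + (k : Int)) = ((k : Nat) : Int) := by ring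
  rw [h1]
  have h2 : ((k : Int) + 1) = (((k + 1 : Nat)) : Int) := by push_cast; ring
  rw [h2, PySem.List.pyGetD_natCast, PySem.List.pyGetD_natCast]

-- A's loop invariant: folding the pairs of a nonempty suffix s from state (done ++ [cur], |done|)
-- and then appending s's last character yields done ++ pre cur (grp s)
lemma A_inv (s : List Char) (hs : s ≠ []) :
    ∀ (done : List (List Char)) (cur : List Char),
      (fun st : List (List Char) × Nat =>
        st.1.set st.2 (st.1.getD st.2 [] ++ [s.getLast hs]))
        ((s.zip s.tail).foldl (fun st p => stepA st p.1 p.2) (done ++ [cur], done.length))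
      = done ++ pre cur (grp s) := by
  induction s with
  | nil => exact absurd rfl hs
  | cons c rest ih =>
    intro done cur
    match rest with
    | [] =>
      simp [grp, pre]
    | d :: rest' =>
      have hne : (d :: rest') ≠ [] := by simp
      have hlast : (c :: d :: rest').getLast hs = (d :: rest').getLast hne := by
        simp [List.getLast_cons]
      rw [show ((c :: d :: rest').zip (c :: d :: rest').tail)
            = (c, d) :: ((d :: rest').zip (d :: rest').tail) from rfl,
          List.foldl_cons, hlast]
      rcases hg : grp (d :: rest') with _ | ⟨t, ts⟩
      · exact absurd hg (grp_ne_nil _ hne)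
      by_cases hc : (isD c && isD d) = true
      · rw [show stepA (done ++ [cur], done.length) c d
              = (done ++ [cur ++ [c]], done.length) by
            simp [stepA, hc]]
        rw [ih hne done (cur ++ [c])]
        rw [grp]
        rw [if_pos hc, hg]
        simp [pre]
      · rw [show stepA (done ++ [cur], done.length) c d
              = ((done ++ [cur ++ [c]]) ++ [[]], (done ++ [cur ++ [c]]).length) by
            simp [stepA, hc]]
        rw [ih hne (done ++ [cur ++ [c]]) []]
        rw [grp, if_neg hc, hg]
        simp [pre]

lemma A_eq_grp (content : String) (h : content.toList ≠ []) :
    group_parts content = (grp content.toList).map String.mk := by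
  unfold group_parts
  simp only
  have hlen : 0 < content.toList.length := List.length_pos_iff.mpr h
  have hi : ((content.toList.length : Int) - 1) = ((content.toList.length - 1 : Nat) : Int) := by
    omega
  rw [hi, PySem.List.pyGet?_natCast, List.getElem?_eq_getElem (by omega)]
  have hfun : (fun (st : List (List Char) × Nat) (i : Int) =>
      if (PySem.Set.issubset (PySem.Set.ofList [PySem.List.pyGetD content.toList i ' '])
            (PySem.Set.ofList "1234567890".toList)
          && PySem.Set.issubset (PySem.Set.ofList [PySem.List.pyGetD content.toList (i + 1) ' '])
            (PySem.Set.ofList "1234567890".toList)) then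
        (st.1.set st.2 (st.1.getD st.2 [] ++ [PySem.List.pyGetD content.toList i ' ']), st.2)
      else
        (st.1.set st.2 (st.1.getD st.2 [] ++ [PySem.List.pyGetD content.toList i ' ']) ++ [[]],
          st.2 + 1))
      = (fun st i => stepA st (PySem.List.pyGetD content.toList i ' ')
          (PySem.List.pyGetD content.toList (i + 1) ' ')) := by
    funext st i
    simp only [stepA, cond_eq]
  rw [hfun, hi] at *
  rw [show ((content.toList.length - 1 : Nat) : Int) = ((content.toList.length : Int) - 1) by omega]
  rw [pyfold_eq_pairs]
  have hA := A_inv content.toList h [] []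
  simp only [List.nil_append, List.length_nil] at hA
  rw [show content.toList[content.toList.length - 1] = content.toList.getLast h by
    rw [List.getLast_eq_getElem]]
  rw [show (([[]] : List (List Char)), (0 : Nat))
      = (([] : List (List Char)) ++ [[]], ([] : List (List Char)).length) from rfl]
  rw [pre_nil _ (grp_ne_nil _ h)] at hA
  simpa using congrArg (List.map String.mk) hA

-- B's loop invariant
lemma B_inv (s : List Char) (hs : s ≠ []) :
    ∀ (done : List (List Char)) (cur : List Char), cur ≠ [] →
      s.foldl stepB (done ++ [cur])
      = done ++ (if isD (s.headD ' ') && isD (cur.getLast?.getD ' ')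
                 then pre cur (grp s) else [cur] ++ grp s) := by
  induction s with
  | nil => exact absurd rfl hs
  | cons c rest ih =>
    intro done cur hcur
    have hstep : stepB (done ++ [cur]) c
        = if isD c && isD (cur.getLast?.getD ' ') then done ++ [cur ++ [c]]
          else (done ++ [cur]) ++ [[c]] := by
      simp [stepB]
    rw [List.foldl_cons, hstep]
    by_cases hb : (isD c && isD (cur.getLast?.getD ' ')) = true
    · rw [if_pos hb]
      match rest with
      | [] =>
        simp only [List.foldl_nil, List.headD, hb]
        simp [grp, pre]
      | d :: rest' =>
        have hlastc : ((cur ++ [c]).getLast?.getD ' ') = c := by simp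
        rw [ih (by simp) done (cur ++ [c]) (by simp), hlastc]
        simp only [List.headD_cons, hb]
        rcases hg : grp (d :: rest') with _ | ⟨t, ts⟩
        · exact absurd hg (grp_ne_nil _ (by simp))
        have hcd : isD c = true := by
          rcases Bool.and_eq_true_iff.mp hb with ⟨h1, _⟩; exact h1
        rw [grp]
        by_cases hd : isD d = true
        · rw [if_pos (by simp [hcd, hd]), hg]
          simp [pre, hd, hcd]
        · rw [if_neg (by simp [hd]), hg]
          simp [pre, hd]
    · rw [if_neg hb]
      match rest with
      | [] =>
        simp only [List.foldl_nil, List.headD_cons, hb]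
        simp [grp]
      | d :: rest' =>
        have hih := ih (by simp) (done ++ [cur]) [c] (by simp)
        simp only [List.append_assoc] at hih ⊢
        rw [hih]
        simp only [List.headD_cons, hb]
        rcases hg : grp (d :: rest') with _ | ⟨t, ts⟩
        · exact absurd hg (grp_ne_nil _ (by simp))
        rw [grp, hg]
        by_cases hc' : isD c = true
        · by_cases hd : isD d = true
          · rw [if_pos (by simp [hc', hd])]
            simp [pre, hd, hc']
          · rw [if_neg (by simp [hd])]
            simp [hd]
        · rw [if_neg (by simp [hc'])]
          simp [hc']

lemma B_eq_grp (content : String) (h : content.toList ≠ []) :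
    group_parts_alt content = (grp content.toList).map String.mk := by
  unfold group_parts_alt
  simp only
  have hfun : (fun (tokens : List (List Char)) (ch : Char) =>
      match tokens.getLast? with
      | none => [[ch]]
      | some t =>
        if ("1234567890".toList.contains ch
            && "1234567890".toList.contains (t.getLast?.getD ' ')) then
          tokens.dropLast ++ [t ++ [ch]]
        else tokens ++ [[ch]]) = stepB := by
    funext tokens ch
    rfl
  rw [hfun]
  match hcs : content.toList with
  | [] => exact absurd hcs h
  | c :: rest =>
    rw [List.foldl_cons, show stepB [] c = [] ++ [[c]] from rfl]
    match rest with
    | [] => simp [grp]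
    | d :: rest' =>
      rw [B_inv (d :: rest') (by simp) [] [c] (by simp)]
      rcases hg : grp (d :: rest') with _ | ⟨t, ts⟩
      · exact absurd hg (grp_ne_nil _ (by simp))
      rw [grp, hg]
      by_cases hc' : isD c = true
      · by_cases hd : isD d = true
        · rw [if_pos (by simp [hc', hd])]
          simp [pre, hc', hd]
        · rw [if_neg (by simp [hd])]
          simp [hd]
      · rw [if_neg (by simp [hc'])]
        simp [hc']

lemma toList_ne_nil (s : String) (h : s ≠ "") : s.toList ≠ [] := by
  intro hh
  exact h (String.ext (by simpa using hh))

-- ===== VERDICT (by name: the statement is the Claim_ definition above) =====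
theorem group_parts_spec : Claim_equal_group_parts := by
  intro content _ hpre
  unfold Spec_group_parts
  have h := toList_ne_nil content hpre
  rw [A_eq_grp content h, B_eq_grp content h]
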